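-- pv_equiv track=rewrite | github.com/mal1on/checkio-solutions | Scientific Expedition/Caps Lock.py | caps_lock
-- ===== SOURCE A (Python) =====
-- def caps_lock(text: str) -> str:
--     # your code here
--     switch = False
--     result = ''
--     for char in text:
--         if char != 'a':
--             if not switch:
--                 result += char
--             if switch:
--                 result += char.upper()
--         else:
--             if not switch:
--                 switch = True
--                 continue
--             if switch:
--                 switch = False
--     return result
-- ===== SOURCE B (Python) =====
-- def caps_lock(text: str) -> str:
--     parts = text.split('a')
--     return ''.join(p.upper() if i % 2 else p for i, p in enumerate(parts))
-- ===== Notes on version B (the rewrite author's own statement) =====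
-- stated objective: idiomatic
-- what changed: Replaces the character-by-character loop with a mutable toggle flag by splitting the text on the switch character and uppercasing every odd-indexed segment, then joining the pieces.
import Mathlib
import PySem

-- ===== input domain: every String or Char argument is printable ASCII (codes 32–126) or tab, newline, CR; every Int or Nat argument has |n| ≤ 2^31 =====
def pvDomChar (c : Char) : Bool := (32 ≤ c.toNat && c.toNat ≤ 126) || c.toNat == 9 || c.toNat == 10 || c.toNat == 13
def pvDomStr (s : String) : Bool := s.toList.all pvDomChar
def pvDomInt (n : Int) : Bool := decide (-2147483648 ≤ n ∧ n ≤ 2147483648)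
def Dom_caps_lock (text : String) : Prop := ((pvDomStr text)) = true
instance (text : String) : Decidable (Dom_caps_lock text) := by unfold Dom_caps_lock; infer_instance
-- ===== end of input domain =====

-- B replaces A's character loop with a toggle flag by split-on-'a' + uppercasing odd segments (idiomatic, same cost).

-- ===== PORT A =====
-- the body of A's for-loop, acting on the state (switch, result)
def caps_lock_step (st : Bool × List Char) (char : Char) : Bool × List Char :=
  if char ≠ 'a' then
    -- 'if not switch: result += char' then 'if switch: result += char.upper()'
    (st.1,
      if st.1 then (if !st.1 then st.2 ++ [char] else st.2) ++ [PySem.Chars.upperChar char]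
      else (if !st.1 then st.2 ++ [char] else st.2))
  else
    -- 'if not switch: switch = True; continue' / 'if switch: switch = False'
    if !st.1 then (true, st.2) else (false, st.2)

def caps_lock (text : String) : String :=
  String.ofList (text.toList.foldl caps_lock_step (false, [])).2

-- ===== PORT B =====
def caps_lock_alt (text : String) : String :=
  String.ofList (PySem.Chars.join []
    ((PySem.List.enumerate (PySem.Chars.splitOn text.toList ['a'])).map
      (fun ip => if PySem.Int.mod ip.1 2 ≠ 0 then PySem.Chars.upper ip.2 else ip.2)))

-- ===== PRECONDITION & SPEC =====
def Spec_caps_lock (text : String) (out : String) : Prop := out = caps_lock_alt text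
instance (text : String) (out : String) : Decidable (Spec_caps_lock text out) := by unfold Spec_caps_lock; infer_instance

-- ===== CLAIM (what is proved, stated in full; the proofs are below) =====
def Claim_equal_caps_lock : Prop := ∀ (text : String), Dom_caps_lock text → Spec_caps_lock text (caps_lock text)

-- ===== LEMMAS AND PROOFS =====

-- alternate rendering: segments between 'a's, uppercased while the switch is on
def pvRender (sw : Bool) : List (List Char) → List Char
  | [] => []
  | p :: ps => (if sw then PySem.Chars.upper p else p) ++ pvRender (!sw) ps

theorem pvRender_modifyHead (sw : Bool) (x : Char) (p : List Char) (ps : List (List Char)) :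
    pvRender sw ((x :: p) :: ps)
      = (if sw then PySem.Chars.upperChar x else x) :: pvRender sw (p :: ps) := by
  cases sw <;> simp [pvRender, PySem.Chars.upper]

theorem pvStep_a (sw : Bool) (res : List Char) :
    caps_lock_step (sw, res) 'a' = (!sw, res) := by
  cases sw <;> simp [caps_lock_step]

theorem pvStep_ne (sw : Bool) (res : List Char) (c : Char) (hc : c ≠ 'a') :
    caps_lock_step (sw, res) c
      = (sw, res ++ [if sw then PySem.Chars.upperChar c else c]) := by
  cases sw <;> simp [caps_lock_step, hc]

-- PySem's fuel-based splitOn on a one-char separator is Mathlib's List.splitOn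
theorem pv_splitOn_go (c : Char) :
    ∀ (fuel : Nat) (l cur : List Char) (acc : List (List Char)), l.length < fuel →
      PySem.Chars.splitOn.go [c] fuel l cur acc
        = acc.reverse ++ (l.splitOn c).modifyHead (cur.reverse ++ ·) := by
  intro fuel
  induction fuel with
  | zero => intro l cur acc h; omega
  | succ f ih =>
    intro l cur acc h
    cases l with
    | nil => simp [PySem.Chars.splitOn.go, List.splitOn, List.splitOnP_nil]
    | cons x rest =>
      rw [PySem.Chars.splitOn.go]
      by_cases hx : x = c
      · subst hx
        simp only [List.isPrefixOf, BEq.rfl, Bool.true_and, if_true,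
          List.length_cons, List.length_nil, List.drop_succ_cons, List.drop_zero]
        rw [ih rest [] (cur.reverse :: acc) (by simpa using Nat.lt_of_succ_lt_succ h)]
        have hne := List.splitOnP_ne_nil (fun y => y == x) rest
        simp only [List.splitOn, List.splitOnP_cons, BEq.rfl, if_true]
        cases hsp : List.splitOnP (fun y => y == x) rest with
        | nil => exact absurd hsp hne
        | cons p ps => simp
      · have hpre : ([c].isPrefixOf (x :: rest)) = false := by
          simp [List.isPrefixOf]; exact fun h' => absurd h'.symm hx
        rw [hpre]
        simp only [Bool.false_eq_true, if_false]
        rw [ih rest (x :: cur) acc (by simpa using Nat.lt_of_succ_lt_succ h)]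
        have hne := List.splitOnP_ne_nil (fun y => y == c) rest
        have hbeq : (x == c) = false := by simp [hx]
        simp only [List.splitOn, List.splitOnP_cons, hbeq, Bool.false_eq_true, if_false]
        cases hsp : List.splitOnP (fun y => y == c) rest with
        | nil => exact absurd hsp hne
        | cons p ps => simp

theorem pv_splitOn_eq (s : List Char) (c : Char) :
    PySem.Chars.splitOn s [c] = s.splitOn c := by
  rw [PySem.Chars.splitOn, pv_splitOn_go c (s.length + 1) s [] [] (by omega)]
  have hne := List.splitOnP_ne_nil (fun y => y == c) s
  cases hsp : List.splitOn c s with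
  | nil => exact absurd hsp hne
  | cons p ps => simp_all [List.splitOn]

-- A's loop computes pvRender of the splitOn segments
theorem pv_foldA (l : List Char) : ∀ (sw : Bool) (res : List Char),
    (l.foldl caps_lock_step (sw, res)).2 = res ++ pvRender sw (List.splitOn 'a' l) := by
  induction l with
  | nil =>
    intro sw res
    cases sw <;> simp [pvRender, List.splitOn, List.splitOnP_nil, PySem.Chars.upper]
  | cons x l ih =>
    intro sw res
    by_cases hx : x = 'a'
    · subst hx
      have hsp : (('a' :: l).splitOn 'a') = [] :: l.splitOn 'a' := by
        simp [List.splitOn, List.splitOnP_cons]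
      rw [hsp, List.foldl_cons, pvStep_a, ih]
      cases sw <;> simp [pvRender, PySem.Chars.upper]
    · have hsp : ((x :: l).splitOn 'a') = (l.splitOn 'a').modifyHead (List.cons x) := by
        have hbeq : (x == 'a') = false := by simp [hx]
        simp [List.splitOn, List.splitOnP_cons, hbeq]
      rw [hsp, List.foldl_cons, pvStep_ne sw res x hx, ih]
      have hne := List.splitOnP_ne_nil (fun y => y == 'a') l
      cases hl : List.splitOn 'a' l with
      | nil => simp [List.splitOn] at hl; exact absurd hl hne
      | cons p ps =>
        rw [List.modifyHead, pvRender_modifyHead]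
        cases sw <;> simp [pvRender]

-- ''.join of the pieces is flatten
theorem pv_join_flatten (xs : List (List Char)) :
    PySem.Chars.join [] xs = xs.flatten := by
  induction xs with
  | nil => simp [PySem.Chars.join, List.intercalate]
  | cons p ps ih =>
    cases ps with
    | nil => simp [PySem.Chars.join, List.intercalate]
    | cons q qs =>
      simp only [PySem.Chars.join, List.intercalate] at *
      simp [List.intersperse] at *
      simpa using ih

-- B's enumerate/parity pass computes pvRender too
theorem pv_foldB (parts : List (List Char)) : ∀ (n : Int), 0 ≤ n →
    ((PySem.List.enumerate parts n).map
      (fun ip => if PySem.Int.mod ip.1 2 ≠ 0 then PySem.Chars.upper ip.2 else ip.2)).flatten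
      = pvRender (decide (PySem.Int.mod n 2 ≠ 0)) parts := by
  induction parts with
  | nil => intro n _; simp [PySem.List.enumerate, pvRender]
  | cons p ps ih =>
    intro n hn
    rw [PySem.List.enumerate_cons]
    have hmod : PySem.Int.mod n 2 = n % 2 := PySem.Int.mod_eq_emod_of_pos (by omega)
    have hmod' : PySem.Int.mod (n + 1) 2 = (n + 1) % 2 := PySem.Int.mod_eq_emod_of_pos (by omega)
    have hflip : (decide (PySem.Int.mod (n + 1) 2 ≠ 0)) = !(decide (PySem.Int.mod n 2 ≠ 0)) := by
      rw [hmod, hmod']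
      by_cases h : n % 2 = 0
      · simp [h]; omega
      · simp [h]; omega
    simp only [List.map_cons, List.flatten_cons, ih (n + 1) (by omega), hflip, pvRender]
    cases hd : decide (PySem.Int.mod n 2 ≠ 0) <;> simp_all

-- ===== VERDICT (by name: the statement is the Claim_ definition above) =====
theorem caps_lock_spec : Claim_equal_caps_lock := by
  intro text _
  show caps_lock text = caps_lock_alt text
  unfold caps_lock caps_lock_alt
  rw [pv_foldA, pv_join_flatten, pv_foldB _ 0 le_rfl, pv_splitOn_eq]
  simp [PySem.Int.mod]
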